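-- pv_equiv track=rewrite | github.com/senicko/dsa | sorting/problems/staircase_step_count.py | stairs_distance_v1
-- ===== SOURCE A (Python) =====
-- def stairs_distance_v1(people, stairs):
--     total = 0
--
--     # (1)
--     for max_height in people:
--         # (2)
--         for step in stairs:
--             if step > max_height:
--                 break
--             total += 1
--
--     return total
-- ===== SOURCE B (Python) =====
-- def stairs_distance_v1(people, stairs):
--     # Build the running-maximum (prefix-max) array of stairs: non-decreasing.
--     cummax = []
--     m = None
--     for s in stairs:
--         m = s if (m is None or s > m) else m
--         cummax.append(m)
--     n = len(cummax)
--     total = 0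
--     # For each person, binary-search (bisect_right) the first prefix-max > max_height.
--     for h in people:
--         lo, hi = 0, n
--         while lo < hi:
--             mid = (lo + hi) // 2
--             if cummax[mid] <= h:
--                 lo = mid + 1
--             else:
--                 hi = mid
--         total += lo
--     return total
-- ===== Notes on version B (the rewrite author's own statement) =====
-- stated objective: faster
-- what changed: Builds the prefix-maximum array of stairs once, then replaces the inner linear scan per person by a binary search (bisect_right style) on that non-decreasing array.
import Mathlib
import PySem

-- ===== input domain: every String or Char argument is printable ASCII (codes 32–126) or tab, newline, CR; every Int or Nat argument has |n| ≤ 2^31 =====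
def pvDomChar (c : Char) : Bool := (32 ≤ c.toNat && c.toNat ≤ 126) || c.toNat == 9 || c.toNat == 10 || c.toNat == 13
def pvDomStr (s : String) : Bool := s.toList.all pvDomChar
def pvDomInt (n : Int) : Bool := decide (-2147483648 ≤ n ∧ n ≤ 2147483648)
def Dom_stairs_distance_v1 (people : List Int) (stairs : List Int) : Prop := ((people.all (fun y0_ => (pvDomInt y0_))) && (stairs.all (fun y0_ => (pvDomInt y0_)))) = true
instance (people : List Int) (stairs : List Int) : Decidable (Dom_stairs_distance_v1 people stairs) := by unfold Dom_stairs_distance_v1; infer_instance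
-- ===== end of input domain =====

-- B builds the prefix-max array of stairs once, then binary-searches it per person (O(s + p log s) vs A's O(p*s)).


-- ===== PORT A =====
-- inner 'for step in stairs: if step > max_height: break; total += 1' as a count
def pvInnerA (stairs : List Int) (maxHeight : Int) : Nat :=
  match stairs with
  | [] => 0
  | step :: rest => if step > maxHeight then 0 else 1 + pvInnerA rest maxHeight

def stairs_distance_v1 (people : List Int) (stairs : List Int) : Int :=
  people.foldl (fun total maxHeight => total + (pvInnerA stairs maxHeight : Int)) 0

-- ===== PORT B =====
-- running-maximum list: 'm = s if (m is None or s > m) else m; cummax.append(m)'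
def pvCummaxAux (m : Int) : List Int → List Int
  | [] => []
  | s :: rest =>
    let m' := if s > m then s else m
    m' :: pvCummaxAux m' rest

def pvCummax : List Int → List Int
  | [] => []
  | s :: rest => s :: pvCummaxAux s rest

-- 'while lo < hi: mid = (lo+hi)//2; if cummax[mid] <= h: lo = mid+1 else hi = mid'
def pvBisect (xs : List Int) (h : Int) (lo hi : Nat) : Nat :=
  if lo < hi then
    let mid := (lo + hi) / 2
    if xs.getD mid 0 ≤ h then pvBisect xs h (mid + 1) hi else pvBisect xs h lo mid
  else lo
termination_by hi - lo
decreasing_by all_goals omega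

def stairs_distance_v1_alt (people : List Int) (stairs : List Int) : Int :=
  let cummax := pvCummax stairs
  let n := cummax.length
  people.foldl (fun total h => total + (pvBisect cummax h 0 n : Int)) 0

-- ===== PRECONDITION & SPEC =====
def Spec_stairs_distance_v1 (people : List Int) (stairs : List Int) (out : Int) : Prop := out = stairs_distance_v1_alt people stairs
instance (people : List Int) (stairs : List Int) (out : Int) : Decidable (Spec_stairs_distance_v1 people stairs out) := by unfold Spec_stairs_distance_v1; infer_instance

-- ===== CLAIM (what is proved, stated in full; the proofs are below) =====
def Claim_equal_stairs_distance_v1 : Prop := ∀ (people : List Int) (stairs : List Int), Dom_stairs_distance_v1 people stairs → Spec_stairs_distance_v1 people stairs (stairs_distance_v1 people stairs)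

-- ===== LEMMAS AND PROOFS =====

-- counting on the running-max list equals counting on the original list
theorem pvInnerA_cummaxAux (rest : List Int) (m h : Int) (hm : m ≤ h) :
    pvInnerA (pvCummaxAux m rest) h = pvInnerA rest h := by
  induction rest generalizing m with
  | nil => rfl
  | cons s r ih =>
    simp only [pvCummaxAux, pvInnerA]
    by_cases hs : s > h
    · have : (if s > m then s else m) > h := by split <;> omega
      simp [hs, this]
    · have hm' : (if s > m then s else m) ≤ h := by split <;> omega
      have : ¬ ((if s > m then s else m) > h) := by omega
      simp [hs, this, ih _ hm']

theorem pvInnerA_cummax (stairs : List Int) (h : Int) :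
    pvInnerA (pvCummax stairs) h = pvInnerA stairs h := by
  cases stairs with
  | nil => rfl
  | cons s rest =>
    simp only [pvCummax, pvInnerA]
    by_cases hs : s > h
    · simp [hs]
    · simp [hs, pvInnerA_cummaxAux rest s h (by omega)]

theorem pvCummaxAux_ge (rest : List Int) (m : Int) :
    ∀ x ∈ pvCummaxAux m rest, m ≤ x := by
  induction rest generalizing m with
  | nil => simp [pvCummaxAux]
  | cons s r ih =>
    intro x hx
    simp only [pvCummaxAux, List.mem_cons] at hx
    have hmm : m ≤ (if s > m then s else m) := by split <;> omega
    rcases hx with rfl | hx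
    · exact hmm
    · exact le_trans hmm (ih _ x hx)

theorem pvCummaxAux_pairwise (rest : List Int) (m : Int) :
    (pvCummaxAux m rest).Pairwise (· ≤ ·) := by
  induction rest generalizing m with
  | nil => simp [pvCummaxAux]
  | cons s r ih =>
    simp only [pvCummaxAux, List.pairwise_cons]
    exact ⟨pvCummaxAux_ge r _, ih _⟩

theorem pvCummax_pairwise (stairs : List Int) : (pvCummax stairs).Pairwise (· ≤ ·) := by
  cases stairs with
  | nil => simp [pvCummax]
  | cons s rest =>
    simp only [pvCummax, List.pairwise_cons]
    exact ⟨pvCummaxAux_ge rest s, pvCummaxAux_pairwise rest s⟩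

theorem pvInnerA_le_length (xs : List Int) (h : Int) : pvInnerA xs h ≤ xs.length := by
  induction xs with
  | nil => simp [pvInnerA]
  | cons s r ih =>
    simp only [pvInnerA, List.length_cons]
    split <;> omega

-- on a non-decreasing list, index i holds a value ≤ h iff i is below the prefix count
theorem sorted_getD_le_iff (xs : List Int) (h : Int) (hs : xs.Pairwise (· ≤ ·)) :
    ∀ i, i < xs.length → (xs.getD i 0 ≤ h ↔ i < pvInnerA xs h) := by
  induction xs with
  | nil => intro i hi; simp at hi
  | cons s r ih =>
    intro i hi
    rw [List.pairwise_cons] at hs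
    cases i with
    | zero =>
      simp only [List.getD, List.getElem?_cons_zero, Option.getD_some, pvInnerA]
      constructor
      · intro hle; simp [show ¬ s > h by omega]
      · intro hlt; by_contra hgt; simp [show s > h by omega] at hlt
    | succ j =>
      have hj : j < r.length := by simpa using hi
      have hget : (s :: r).getD (j+1) 0 = r.getD j 0 := by simp [List.getD]
      rw [hget]
      have hmem : r.getD j 0 ∈ r := by
        rw [List.getD_eq_getElem r 0 hj]; exact List.getElem_mem hj
      by_cases hgt : s > h
      · have h2 : ¬ (r.getD j 0 ≤ h) := by have := hs.1 _ hmem; omega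
        simp only [pvInnerA, if_pos hgt]
        exact ⟨fun hc => absurd hc h2, fun hc => by omega⟩
      · simp only [pvInnerA, if_neg hgt]
        have := ih hs.2 j hj
        omega

-- binary search returns exactly the prefix count
theorem pvBisect_eq (xs : List Int) (h : Int)
    (hiff : ∀ i, i < xs.length → (xs.getD i 0 ≤ h ↔ i < pvInnerA xs h)) :
    ∀ lo hi, lo ≤ pvInnerA xs h → pvInnerA xs h ≤ hi → hi ≤ xs.length →
      pvBisect xs h lo hi = pvInnerA xs h := by
  intro lo hi
  induction hn : hi - lo using Nat.strong_induction_on generalizing lo hi with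
  | _ n ih =>
    intro hlo hhi hlen
    rw [pvBisect]
    by_cases hlt : lo < hi
    · simp only [hlt, if_true]
      set mid := (lo + hi) / 2 with hmid
      have hmlt : mid < xs.length := by omega
      have := hiff mid hmlt
      by_cases hle : xs.getD mid 0 ≤ h
      · have hmk : mid < pvInnerA xs h := this.mp hle
        simp only [hle, if_true]
        exact ih (hi - (mid + 1)) (by omega) (mid + 1) hi rfl (by omega) hhi hlen
      · have hkm : pvInnerA xs h ≤ mid := by
          by_contra hc; exact hle (this.mpr (by omega))
        simp only [hle, if_false]
        exact ih (mid - lo) (by omega) lo mid rfl hlo hkm (by omega)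
    · simp only [hlt, if_false]; omega

theorem pvBisect_full (stairs : List Int) (h : Int) :
    pvBisect (pvCummax stairs) h 0 (pvCummax stairs).length = pvInnerA stairs h := by
  have hk := pvInnerA_cummax stairs h
  have := pvBisect_eq (pvCummax stairs) h
    (sorted_getD_le_iff (pvCummax stairs) h (pvCummax_pairwise stairs))
    0 (pvCummax stairs).length (Nat.zero_le _)
    (pvInnerA_le_length _ _) (le_refl _)
  omega

-- ===== VERDICT (by name: the statement is the Claim_ definition above) =====
theorem stairs_distance_v1_spec : Claim_equal_stairs_distance_v1 := by
  intro people stairs _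
  unfold Spec_stairs_distance_v1 stairs_distance_v1 stairs_distance_v1_alt
  simp only [pvBisect_full]
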